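-- pv_equiv track=rewrite | github.com/ogeorgecarlos/CPF_ID_generator_validator | module.py | cpf_generator
-- ===== SOURCE A (Python) =====
-- def cpf_generator(nine_digits):
--     '''From the first nine digits entered by the user, this function uses the logical algorithm to generate the last two checker digits'''
--
--     digit_to_verify = 0 #counter to check witch check digit is being calculated
--     while True:
--         digit_to_verify  += 1
--         sum_nine_digits = 0 #sum of digits as part of the logical algorithm
--
--         if digit_to_verify == 1:
--             counter = 11 #counter user as multiplier of the digits obtained, when these are 9 in total.
--         else:
--             counter = 12 #counter user as multiplier of the digits obtained, when these are 10 in total.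
--
--         for number  in nine_digits:
--             counter -= 1
--             sum_nine_digits += (int(number)*counter)
--
--         if digit_to_verify  == 1:
--             if sum_nine_digits%11 < 2:
--                 digit_1= '0'
--                 nine_digits += digit_1
--             else:
--                 digit_1 = str((11-(sum_nine_digits%11)))
--                 nine_digits += digit_1
--
--         if digit_to_verify  == 2:
--             if sum_nine_digits%11 < 2:
--                 digit_2='0'
--                 break
--             else:
--                 digit_2 = str((11-(sum_nine_digits%11)))
--                 break
--
--     nine_digits += digit_2
--     return nine_digits #in this return, the cariable 'nine_digits' will be 11 digits in total (the initial nine digits plus the last 2 digits obtained through the logical algorithm executed.)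
-- ===== SOURCE B (Python) =====
-- def cpf_generator(nine_digits):
--     '''From the first nine digits entered by the user, this function uses the logical algorithm to generate the last two checker digits'''
--     # Single pass: s = plain digit sum, w = weighted sum with weights 10,9,...
--     s = 0
--     w = 0
--     for i, ch in enumerate(nine_digits):
--         d = int(ch)
--         s += d
--         w += d * (10 - i)
--     r1 = w % 11
--     v1 = 0 if r1 < 2 else 11 - r1
--     # Second weighted sum derived algebraically, without rescanning the string:
--     # sum over s+str(v1) with weights 11,10,... = w + s + v1*(11 - len).
--     r2 = (w + s + v1 * (11 - len(nine_digits))) % 11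
--     v2 = 0 if r2 < 2 else 11 - r2
--     return nine_digits + str(v1) + str(v2)
-- ===== Notes on version B (the rewrite author's own statement) =====
-- stated objective: alternative
-- what changed: Replaced A's two separate weighted scans (the second one re-reading the string extended with the first check digit) by a single pass accumulating the plain digit sum s and the weighted sum w, deriving the second check digit algebraically as (w + s + v1*(11 - len)) % 11 instead of rescanning.
-- outside the precondition, e.g. on cpf_generator('12345678a'): A raises ValueError, B raises ValueError
import Mathlib
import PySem

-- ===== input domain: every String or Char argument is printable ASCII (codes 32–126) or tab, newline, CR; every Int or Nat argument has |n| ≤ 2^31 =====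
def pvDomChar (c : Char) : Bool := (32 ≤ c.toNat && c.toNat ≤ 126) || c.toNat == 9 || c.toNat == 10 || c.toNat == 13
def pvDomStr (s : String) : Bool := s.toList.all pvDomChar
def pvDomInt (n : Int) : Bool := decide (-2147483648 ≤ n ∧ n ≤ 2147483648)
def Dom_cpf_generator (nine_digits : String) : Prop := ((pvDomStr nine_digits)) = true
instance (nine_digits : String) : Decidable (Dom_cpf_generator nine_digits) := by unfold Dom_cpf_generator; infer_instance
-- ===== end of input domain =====

-- B replaces A's two weighted scans (the second rescanning the string extended with the
-- first check digit) by ONE pass accumulating (digit sum s, weighted sum w) and deriving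
-- the second check digit algebraically as (w + s + v1*(11 - len)) % 11.


-- int(ch) for a one-character string; Pre_ confines us to digit characters, where it never raises
def pvDigit (c : Char) : Int := (PySem.Int.ofChars? [c]).getD 0

-- ===== PORT A =====
-- A's while-True loop runs exactly twice (digit_to_verify = 1 then 2, the second iteration
-- always breaks), so it is transliterated as the two unrolled iterations, each keeping A's
-- mutable (counter, sum_nine_digits) pair as a foldl state with counter decremented first.
def cpf_generator (nine_digits : String) : String :=
  -- iteration with digit_to_verify == 1: counter starts at 11
  let st1 := nine_digits.toList.foldl
    (fun st c => (st.1 - 1, st.2 + pvDigit c * (st.1 - 1))) ((11 : Int), (0 : Int))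
  let nine_digits1 :=
    if PySem.Int.mod st1.2 11 < 2 then nine_digits ++ "0"
    else nine_digits ++ PySem.Int.toStr (11 - PySem.Int.mod st1.2 11)
  -- iteration with digit_to_verify == 2: counter starts at 12, string now has the first check digit
  let st2 := nine_digits1.toList.foldl
    (fun st c => (st.1 - 1, st.2 + pvDigit c * (st.1 - 1))) ((12 : Int), (0 : Int))
  let digit_2 :=
    if PySem.Int.mod st2.2 11 < 2 then "0"
    else PySem.Int.toStr (11 - PySem.Int.mod st2.2 11)
  nine_digits1 ++ digit_2

-- ===== PORT B =====
-- One pass over enumerate(nine_digits) with state (s, w); second digit from the identity.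
def cpf_generator_alt (nine_digits : String) : String :=
  let sw := (PySem.List.enumerate nine_digits.toList).foldl
    (fun sw p => (sw.1 + pvDigit p.2, sw.2 + pvDigit p.2 * (10 - p.1))) ((0 : Int), (0 : Int))
  let r1 := PySem.Int.mod sw.2 11
  let v1 := if r1 < 2 then (0 : Int) else 11 - r1
  let r2 := PySem.Int.mod (sw.2 + sw.1 + v1 * (11 - PySem.Str.len nine_digits)) 11
  let v2 := if r2 < 2 then (0 : Int) else 11 - r2
  nine_digits ++ PySem.Int.toStr v1 ++ PySem.Int.toStr v2

-- ===== PRECONDITION & SPEC =====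
-- Pre_ excludes exactly the inputs containing a non-digit character, on which A's int() raises ValueError.
def Pre_cpf_generator (nine_digits : String) : Prop :=
  nine_digits.toList.all Char.isDigit = true
instance (nine_digits : String) : Decidable (Pre_cpf_generator nine_digits) := by
  unfold Pre_cpf_generator; infer_instance
def pvWitness_cpf_generator : String := "123456789"

def Spec_cpf_generator (nine_digits : String) (out : String) : Prop := out = cpf_generator_alt nine_digits
instance (nine_digits : String) (out : String) : Decidable (Spec_cpf_generator nine_digits out) := by unfold Spec_cpf_generator; infer_instance

-- ===== CLAIM (what is proved, stated in full; the proofs are below) =====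
def Claim_equal_cpf_generator : Prop := ∀ (nine_digits : String), Dom_cpf_generator nine_digits → Pre_cpf_generator nine_digits → Spec_cpf_generator nine_digits (cpf_generator nine_digits)

-- ===== LEMMAS AND PROOFS =====

-- weighted digit sum with strictly decreasing weight starting at w
def pvWsum : List Char → Int → Int
  | [], _ => 0
  | c :: t, w => pvDigit c * w + pvWsum t (w - 1)

-- plain digit sum
def pvDsum : List Char → Int
  | [] => 0
  | c :: t => pvDigit c + pvDsum t

theorem foldA_eq (l : List Char) (c0 s0 : Int) :
    (l.foldl (fun st c => (st.1 - 1, st.2 + pvDigit c * (st.1 - 1))) (c0, s0)).2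
      = s0 + pvWsum l (c0 - 1) := by
  induction l generalizing c0 s0 with
  | nil => simp [pvWsum]
  | cons c t ih =>
    simp only [List.foldl_cons, pvWsum, ih]
    ring_nf

theorem foldB_eq (l : List Char) (k : Int) (p0 : Int × Int) :
    ((PySem.List.enumerate l k).foldl
        (fun sw p => (sw.1 + pvDigit p.2, sw.2 + pvDigit p.2 * (10 - p.1))) p0)
      = (p0.1 + pvDsum l, p0.2 + pvWsum l (10 - k)) := by
  induction l generalizing k p0 with
  | nil => simp [PySem.List.enumerate_nil, pvWsum, pvDsum]
  | cons c t ih =>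
    rw [PySem.List.enumerate_cons, List.foldl_cons, ih]
    rw [show (10 : Int) - (k + 1) = 10 - k - 1 by ring]
    simp only [pvWsum, pvDsum]
    refine Prod.ext ?_ ?_ <;> simp <;> ring_nf

theorem pvWsum_append (l1 l2 : List Char) (w : Int) :
    pvWsum (l1 ++ l2) w = pvWsum l1 w + pvWsum l2 (w - l1.length) := by
  induction l1 generalizing w with
  | nil => simp [pvWsum]
  | cons c t ih =>
    simp only [List.cons_append, pvWsum, ih, List.length_cons]
    push_cast
    ring_nf

theorem pvWsum_shift (l : List Char) (w : Int) :
    pvWsum l (w + 1) = pvWsum l w + pvDsum l := by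
  induction l generalizing w with
  | nil => simp [pvWsum, pvDsum]
  | cons c t ih =>
    have := ih (w - 1)
    simp only [pvWsum, pvDsum] at *
    rw [show w + 1 - 1 = (w - 1) + 1 by ring, this]
    ring_nf

-- the single character A appends for a remainder r ∈ [0, 11): it equals toStr v with
-- v = if r < 2 then 0 else 11 - r, and its digit value / weighted sum are known
theorem toStr_digit (v : Int) (h0 : 0 ≤ v) (h9 : v ≤ 9) (w : Int) :
    pvWsum (PySem.Int.toStr v).toList w = v * w ∧ ((PySem.Int.toStr v).toList).length = 1 := by
  have key : ∀ (c : Char), (PySem.Int.toStr v).toList = [c] → pvDigit c = v →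
      pvWsum (PySem.Int.toStr v).toList w = v * w ∧ ((PySem.Int.toStr v).toList).length = 1 := by
    intro c hc hd
    rw [hc]; simp [pvWsum, hd]
  interval_cases v
  · exact key '0' (by decide) (by decide)
  · exact key '1' (by decide) (by decide)
  · exact key '2' (by decide) (by decide)
  · exact key '3' (by decide) (by decide)
  · exact key '4' (by decide) (by decide)
  · exact key '5' (by decide) (by decide)
  · exact key '6' (by decide) (by decide)
  · exact key '7' (by decide) (by decide)
  · exact key '8' (by decide) (by decide)
  · exact key '9' (by decide) (by decide)

-- the second-pass weighted sum of A equals B's algebraic expression, for any 0 ≤ v1 ≤ 9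
theorem second_sum (s : String) (v1 : Int) (h0 : 0 ≤ v1) (h9 : v1 ≤ 9) :
    pvWsum ((s ++ PySem.Int.toStr v1).toList) 11
      = pvWsum s.toList 10 + pvDsum s.toList + v1 * (11 - (s.toList.length : Int)) := by
  rw [String.toList_append, pvWsum_append, (toStr_digit v1 h0 h9 _).1,
    show (11 : Int) = 10 + 1 by norm_num, pvWsum_shift]

-- ===== VERDICT (by name: the statement is the Claim_ definition above) =====
theorem cpf_generator_spec : Claim_equal_cpf_generator := by
  intro s _ _
  show cpf_generator s = cpf_generator_alt s
  unfold cpf_generator cpf_generator_alt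
  rw [foldB_eq]
  simp only [foldA_eq, zero_add, PySem.Str.len_eq,
    show (11 : Int) - 1 = 10 by norm_num, show (10 : Int) - 0 = 10 by norm_num,
    show (12 : Int) - 1 = 11 by norm_num]
  have hmn : (0 : Int) ≤ PySem.Int.mod (pvWsum s.toList 10) 11 :=
    PySem.Int.mod_nonneg _ (by norm_num)
  have hml : PySem.Int.mod (pvWsum s.toList 10) 11 < 11 :=
    PySem.Int.mod_lt _ (by norm_num)
  have hz : ("0" : String) = PySem.Int.toStr 0 := by decide
  by_cases h : PySem.Int.mod (pvWsum s.toList 10) 11 < 2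
  · simp only [h, if_true]
    rw [hz, second_sum s 0 (by norm_num) (by norm_num), ← apply_ite PySem.Int.toStr]
  · simp only [h, if_false]
    rw [hz, second_sum s (11 - PySem.Int.mod (pvWsum s.toList 10) 11) (by omega) (by omega),
      ← apply_ite PySem.Int.toStr]
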